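-- pv_equiv track=rewrite | github.com/LiuZhixing2000/IT5001 | prob_set_5.py | burger_price
-- ===== SOURCE A (Python) =====
-- def burger_price(burger):
--     ingredient_price = {
--         'B': 50,
--         'C': 80,
--         'P': 150,
--         'V': 70,
--         'O': 40,
--         'M': 90
--     }
--     acc = 0
--     for ing in burger:
--         acc += ingredient_price[ing]
--     return acc
-- ===== SOURCE B (Python) =====
-- def burger_price(burger):
--     ingredient_price = {
--         'B': 50,
--         'C': 80,
--         'P': 150,
--         'V': 70,
--         'O': 40,
--         'M': 90
--     }
--     counts = {}
--     for ing in burger: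
--         counts[ing] = counts.get(ing, 0) + 1
--     return sum(n * ingredient_price[ing] for ing, n in counts.items())
-- ===== Notes on version B (the rewrite author's own statement) =====
-- stated objective: alternative
-- what changed: B aggregates the burger into a character-frequency table in one pass and then sums count * price over the distinct ingredients, instead of one price lookup per character; an unknown ingredient still raises KeyError (excluded by Pre_).
import Mathlib
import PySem

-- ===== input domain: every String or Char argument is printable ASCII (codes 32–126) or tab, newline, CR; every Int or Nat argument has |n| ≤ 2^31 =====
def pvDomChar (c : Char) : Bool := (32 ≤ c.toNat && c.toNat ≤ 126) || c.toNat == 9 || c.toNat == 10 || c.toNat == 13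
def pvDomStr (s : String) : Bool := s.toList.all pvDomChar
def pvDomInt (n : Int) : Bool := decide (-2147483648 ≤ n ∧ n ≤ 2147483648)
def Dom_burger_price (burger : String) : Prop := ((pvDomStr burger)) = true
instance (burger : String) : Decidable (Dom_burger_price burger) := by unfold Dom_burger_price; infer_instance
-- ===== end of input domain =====

-- B aggregates characters into a frequency table, then sums count * price over distinct ingredients.

-- ===== PORT A =====
-- the ingredient_price dict, shared by both ports (as in both Pythons)
def pvIngredientPrice : PySem.Dict Char Int :=
  ((((((PySem.Dict.empty).insert 'B' 50).insert 'C' 80).insert 'P' 150).insert 'V' 70).insert 'O' 40).insert 'M' 90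

-- A: acc += ingredient_price[ing] per character; a missing key raises KeyError in
-- Python — those inputs are excluded by Pre_, so getD 0 is never the default here.
def burger_price (burger : String) : Int :=
  burger.toList.foldl (fun acc ing => acc + pvIngredientPrice.getD ing 0) 0

-- ===== PORT B =====
-- B: build counts (one insert with get-default per character), then sum n * price over items.
def burger_price_alt (burger : String) : Int :=
  let counts := burger.toList.foldl (fun d x => d.insert x (d.getD x 0 + 1)) PySem.Dict.empty
  (counts.items.map (fun kc => kc.2 * pvIngredientPrice.getD kc.1 0)).sum

-- ===== PRECONDITION & SPEC =====
-- Pre_ excludes exactly the strings containing a character outside the price dict,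
-- on which Python A (and B) raises KeyError.
def Pre_burger_price (burger : String) : Prop :=
  (burger.toList.all (fun c => ['B','C','P','V','O','M'].contains c)) = true
instance (burger : String) : Decidable (Pre_burger_price burger) := by unfold Pre_burger_price; infer_instance
def pvWitness_burger_price : String := "BCOMVP"

def Spec_burger_price (burger : String) (out : Int) : Prop := out = burger_price_alt burger
instance (burger : String) (out : Int) : Decidable (Spec_burger_price burger out) := by unfold Spec_burger_price; infer_instance

-- ===== CLAIM (what is proved, stated in full; the proofs are below) =====
def Claim_equal_burger_price : Prop := ∀ (burger : String), Dom_burger_price burger → Pre_burger_price burger → Spec_burger_price burger (burger_price burger)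

-- ===== LEMMAS AND PROOFS =====

-- A's loop is the sum of the prices of all characters.
theorem pv_foldl_add_map (f : Char → Int) (xs : List Char) :
    ∀ (a : Int), xs.foldl (fun acc x => acc + f x) a = a + (xs.map f).sum := by
  induction xs with
  | nil => simp
  | cons x xs ih => intro a; simp [List.foldl_cons, ih]; ring

-- summing an indicator over a Nodup list containing x picks out c
theorem pv_sum_indicator (x : Char) (f : Char → Int) :
    ∀ (ks : List Char), ks.Nodup → x ∈ ks →
      (ks.map (fun k => if x = k then f k else 0)).sum = f x := by
  intro ks
  induction ks with
  | nil => simp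
  | cons k ks ih =>
    intro hnd hmem
    rcases List.mem_cons.mp hmem with h | h
    · subst h
      have : (ks.map (fun k => if x = k then f k else 0)).sum = 0 := by
        apply List.sum_eq_zero
        intro n hn
        rcases List.mem_map.mp hn with ⟨y, hy, hyn⟩
        have : x ≠ y := fun hxy => (List.nodup_cons.mp hnd).1 (hxy ▸ hy)
        simp [this] at hyn
        omega
      simp [this]
    · have hne : x ≠ k := fun hxk => (List.nodup_cons.mp hnd).1 (hxk ▸ h)
      simp [hne, ih (List.nodup_cons.mp hnd).2 h]

-- summing count * price over any Nodup cover of xs equals summing price over xs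
theorem pv_count_sum (f : Char → Int) :
    ∀ (xs ks : List Char), ks.Nodup → (∀ y ∈ xs, y ∈ ks) →
      (ks.map (fun k => (xs.count k : Int) * f k)).sum = (xs.map f).sum := by
  intro xs
  induction xs with
  | nil => intro ks _ _; simp
  | cons x xs ih =>
    intro ks hnd hcov
    have hsplit : (ks.map (fun k => ((x :: xs).count k : Int) * f k)).sum
        = (ks.map (fun k => (xs.count k : Int) * f k)).sum
          + (ks.map (fun k => if x = k then f k else 0)).sum := by
      rw [← List.sum_map_add]
      refine congrArg List.sum (List.map_congr_left (fun k _ => ?_))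
      by_cases h : x = k
      · subst h; simp [List.count_cons_self]; ring
      · simp [h]
    have hind : (ks.map (fun k => if x = k then f k else 0)).sum = f x :=
      pv_sum_indicator x f ks hnd (hcov x (by simp))
    rw [hsplit, hind, ih ks hnd (fun y hy => hcov y (List.mem_cons_of_mem _ hy))]
    simp only [List.map_cons, List.sum_cons]
    ring

-- ===== VERDICT (by name: the statement is the Claim_ definition above) =====
theorem burger_price_spec : Claim_equal_burger_price := by
  intro burger _ _
  unfold Spec_burger_price burger_price burger_price_alt
  simp only [PySem.Dict.foldl_insert_getD_add_one_eq_counter, PySem.Dict.items_counter,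
    pv_foldl_add_map]
  rw [List.map_map]
  have := pv_count_sum (fun k => pvIngredientPrice.getD k 0) burger.toList
    (PySem.Set.ofList burger.toList)
    (PySem.Set.nodup_ofList _)
    (fun y hy => (PySem.Set.mem_ofList _ _).mpr hy)
  simp only [Function.comp_def]
  rw [this]
  ring
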